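-- pv_equiv track=rewrite | github.com/qinyuenlp/CommunityDetection | evaluation.py | to_community
-- ===== SOURCE A (Python) =====
-- def to_community(distinct, partition):
--     """
--     Turn partition(a list) to list of communities(a list of sets)
--
--     """
--     distinct = list(distinct)
--     partition = list(partition)
--     communities = []
--     for com in range(len(distinct)):
--         community = []
--         for node_index in range(len(partition)):
--             if partition[node_index] == distinct[com]:
--                 community.append(node_index)
--         communities.append(set(community))
--     return communities
-- ===== SOURCE B (Python) =====
-- def to_community(distinct, partition):
--     """One-pass grouping: index nodes by label once, then emit per distinct label."""
--     groups = {}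
--     for i, p in enumerate(partition):
--         groups.setdefault(p, []).append(i)
--     return [set(groups.get(d, [])) for d in distinct]
-- ===== Notes on version B (the rewrite author's own statement) =====
-- stated objective: faster
-- what changed: Replaces the D*N double scan (one full pass over partition per distinct label) with a single pass that groups indices into a dict keyed by label, then emits groups in distinct's order.
import Mathlib
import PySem

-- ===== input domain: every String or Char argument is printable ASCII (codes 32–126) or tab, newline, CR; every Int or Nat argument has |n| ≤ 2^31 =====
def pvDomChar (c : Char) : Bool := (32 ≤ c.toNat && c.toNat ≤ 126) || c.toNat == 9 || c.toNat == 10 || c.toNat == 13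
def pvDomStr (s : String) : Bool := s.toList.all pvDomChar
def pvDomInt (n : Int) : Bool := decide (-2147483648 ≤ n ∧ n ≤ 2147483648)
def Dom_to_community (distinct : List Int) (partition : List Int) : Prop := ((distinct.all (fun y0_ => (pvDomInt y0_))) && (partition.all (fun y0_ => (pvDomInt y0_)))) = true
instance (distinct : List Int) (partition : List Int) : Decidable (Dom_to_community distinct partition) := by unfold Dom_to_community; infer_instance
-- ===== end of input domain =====

-- B groups node indices by label in ONE pass over partition (dict label -> indices), then emits
-- one set per entry of distinct; A rescans all of partition once per entry of distinct.

-- ===== PORT A =====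
def to_community (distinct : List Int) (partition : List Int) : List (List Int) :=
  (PySem.List.pyRange 0 distinct.length 1).foldl
    (fun communities com =>
      let community :=
        (PySem.List.pyRange 0 partition.length 1).foldl
          (fun community node_index =>
            if PySem.List.pyGetD partition node_index 0 == PySem.List.pyGetD distinct com 0 then
              community ++ [node_index]
            else community)
          []
      communities ++ [PySem.Set.ofList community])
    []

-- ===== PORT B =====
def to_community_alt (distinct : List Int) (partition : List Int) : List (List Int) :=
  let groups : PySem.Dict Int (List Int) :=
    (PySem.List.enumerate partition).foldl
      (fun g q => g.modify q.2 [] (· ++ [q.1]))   -- groups.setdefault(p, []).append(i)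
      PySem.Dict.empty
  distinct.map (fun d => PySem.Set.ofList (groups.getD d []))

-- ===== PRECONDITION & SPEC =====
def Spec_to_community (distinct : List Int) (partition : List Int) (out : List (List Int)) : Prop := out = to_community_alt distinct partition
instance (distinct : List Int) (partition : List Int) (out : List (List Int)) : Decidable (Spec_to_community distinct partition out) := by unfold Spec_to_community; infer_instance

-- ===== CLAIM (what is proved, stated in full; the proofs are below) =====
def Claim_equal_to_community : Prop := ∀ (distinct : List Int) (partition : List Int), Dom_to_community distinct partition → Spec_to_community distinct partition (to_community distinct partition)

-- ===== LEMMAS AND PROOFS =====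

-- A's side, rewritten: one filtered index list per element of distinct.
theorem to_community_eq_map (distinct partition : List Int) :
    to_community distinct partition =
      distinct.map (fun d => PySem.Set.ofList
        ((PySem.List.pyRange 0 partition.length 1).filter
          (fun i => PySem.List.pyGetD partition i 0 == d))) := by
  unfold to_community
  rw [PySem.List.foldl_append_singleton_eq_map]
  simp only [List.nil_append]
  conv_rhs => rw [← PySem.List.map_pyGetD_pyRange_zero distinct 0]
  rw [List.map_map]
  refine List.map_congr_left ?_
  intro com _
  simp only [Function.comp]
  rw [PySem.List.foldl_append_if]
  simp

-- B's side: the dict lookup at d is exactly that filtered index list.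
theorem alt_groups_getD (partition : List Int) (d : Int) :
    (((PySem.List.enumerate partition).foldl
        (fun (g : PySem.Dict Int (List Int)) q => g.modify q.2 [] (· ++ [q.1]))
        PySem.Dict.empty).getD d []) =
      (PySem.List.pyRange 0 partition.length 1).filter
        (fun i => PySem.List.pyGetD partition i 0 == d) := by
  have hswap : ((PySem.List.enumerate partition).map (fun q => (q.2, q.1))).foldl
      (fun (g : PySem.Dict Int (List Int)) p => g.modify p.1 [] (· ++ [p.2]))
      PySem.Dict.empty
      = (PySem.List.enumerate partition).foldl
        (fun (g : PySem.Dict Int (List Int)) q => g.modify q.2 [] (· ++ [q.1]))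
        PySem.Dict.empty := by
    rw [List.foldl_map]
  rw [← hswap, PySem.Dict.getD_foldl_modify_append]
  rw [PySem.List.enumerate_eq_map_pyRange partition 0]
  simp [List.filter_map, Function.comp_def]

-- ===== VERDICT (by name: the statement is the Claim_ definition above) =====
theorem to_community_spec : Claim_equal_to_community := by
  intro distinct partition _
  unfold Spec_to_community to_community_alt
  rw [to_community_eq_map]
  refine List.map_congr_left ?_
  intro d _
  rw [alt_groups_getD]
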